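-- pv_equiv track=rewrite | github.com/Mousie/GwtS-Command-Filter | GwtSUtils.py | encode9x
-- ===== SOURCE A (Python) =====
-- def encode9x(values):
--     """ Encodes a command with the appropriate 9X length code and CRC
--     :param values: int[] Commands in decimal format OR str[] commands in hex format OR a single str of commands in hex
--     :return: int[] 9x encoded commands in decimal format
--     """
--     if type(values) is str:
--         values = values.split()  # Split user input into str[]
--     if type(values) is list:
--         try:
--             if type(values[0]) is str:
--                 values = [int(value, 16) for value in values]  # Convert str[] with hex values to int[]
--         except:
--             pass
--     values.insert(0, len(values) + 143)
--     values.append(crc_9x(values))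
--     return values
--
-- def crc_9x(values):
--     """ Calculate CRC for 9X commands
--     :param values: int[] Commands, with accompanying 9x length code, written in decimal format.
--     :return: int[] CRC value for 9X commands
--     """
--     crc = 0
--     for value in values:
--         crc ^= value
--         for num in range(8):
--             crc = (crc >> 1 ^ 0x8C if crc & 1 else crc >> 1)
--     return crc
-- ===== SOURCE B (Python) =====
-- # Table-driven CRC8 (poly 0x8C, reflected): one table lookup per element
-- # instead of the 8-iteration bit loop of the original.
--
-- def _make_table():
--     table = []
--     for byte in range(256):
--         c = byte
--         for _ in range(8):
--             c = (c >> 1 ^ 0x8C if c & 1 else c >> 1)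
--         table.append(c)
--     return table
--
-- _CRC9X_TABLE = _make_table()
--
-- def encode9x(values):
--     """ Encodes a command with the appropriate 9X length code and CRC
--     :param values: int[] Commands in decimal format OR str[] commands in hex format OR a single str of commands in hex
--     :return: int[] 9x encoded commands in decimal format
--     """
--     if type(values) is str:
--         values = values.split()  # Split user input into str[]
--     if type(values) is list:
--         try:
--             if type(values[0]) is str:
--                 values = [int(value, 16) for value in values]  # Convert str[] with hex values to int[]
--         except:
--             pass
--     values.insert(0, len(values) + 143)
--     crc = 0
--     for value in values:
--         x = crc ^ value
--         crc = (x >> 8) ^ _CRC9X_TABLE[x & 0xFF]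
--     values.append(crc)
--     return values
-- ===== Notes on version B (the rewrite author's own statement) =====
-- stated objective: faster
-- what changed: The 8-iteration bit-by-bit CRC loop per element (via the crc_9x helper) is replaced by a precomputed 256-entry CRC8 table (polynomial 0x8C) with a single shift-xor-lookup per element, inlined into encode9x.
import Mathlib
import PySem

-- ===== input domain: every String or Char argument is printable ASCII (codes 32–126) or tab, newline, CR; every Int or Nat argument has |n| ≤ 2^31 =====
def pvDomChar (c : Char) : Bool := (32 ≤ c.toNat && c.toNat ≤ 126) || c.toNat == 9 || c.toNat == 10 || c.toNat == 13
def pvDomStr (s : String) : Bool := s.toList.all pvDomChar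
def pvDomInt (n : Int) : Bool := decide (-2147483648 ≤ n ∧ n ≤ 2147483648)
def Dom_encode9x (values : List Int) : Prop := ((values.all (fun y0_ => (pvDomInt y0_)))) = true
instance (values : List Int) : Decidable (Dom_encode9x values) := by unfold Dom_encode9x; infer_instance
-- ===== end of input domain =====

-- B replaces the bit-by-bit CRC8 loop with a precomputed 256-entry table (one lookup per
-- element); same return value. Both Pythons mutate the argument list in place (insert/append);
-- the equivalence proved here is about the RETURN value (the mutation is identical anyway).
-- On a List Int input the Python str-normalization branches are no-ops (type checks fail;
-- the IndexError on [] is swallowed by the bare `except`), so the ports omit them.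

-- ===== PORT A =====
-- one iteration of `crc = (crc >> 1 ^ 0x8C if crc & 1 else crc >> 1)`
def crc9xRound (crc : Int) : Int :=
  if PySem.Int.band crc 1 ≠ 0 then PySem.Int.bxor (crc >>> (1:Nat)) 0x8C else crc >>> (1:Nat)

def crc_9x (values : List Int) : Int :=
  values.foldl
    (fun crc value =>
      (PySem.List.pyRange 0 8 1).foldl (fun c _ => crc9xRound c) (PySem.Int.bxor crc value))
    0

def encode9x (values : List Int) : List Int :=
  let values := ((values.length : Int) + 143) :: values
  values ++ [crc_9x values]

-- ===== PORT B =====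
-- _make_table: CRC of each single byte, by the 8-round bit loop
def crcTableEntry (byte : Int) : Int :=
  (PySem.List.pyRange 0 8 1).foldl
    (fun c _ => if PySem.Int.band c 1 ≠ 0 then PySem.Int.bxor (c >>> (1:Nat)) 0x8C else c >>> (1:Nat))
    byte

def crcTable : List Int := (PySem.List.pyRange 0 256 1).map crcTableEntry

def encode9x_alt (values : List Int) : List Int :=
  let values := ((values.length : Int) + 143) :: values
  let crc := values.foldl
    (fun crc value =>
      let x := PySem.Int.bxor crc value
      -- TABLE[x & 0xFF]: the index is provably in [0, 256), so the `getD 0` default is never taken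
      PySem.Int.bxor (x >>> (8:Nat)) ((PySem.List.pyGet? crcTable (PySem.Int.band x 255)).getD 0))
    0
  values ++ [crc]

-- ===== PRECONDITION & SPEC =====
def Spec_encode9x (values : List Int) (out : List Int) : Prop := out = encode9x_alt values
instance (values : List Int) (out : List Int) : Decidable (Spec_encode9x values out) := by unfold Spec_encode9x; infer_instance

-- ===== CLAIM (what is proved, stated in full; the proofs are below) =====
def Claim_equal_encode9x : Prop := ∀ (values : List Int), Dom_encode9x values → Spec_encode9x values (encode9x values)

-- ===== LEMMAS AND PROOFS =====

-- Nat shadows of the round function on the two's-complement halves: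
-- crc9xRound (Int.ofNat n) = Int.ofNat (rP n) and crc9xRound (Int.negSucc m) = Int.negSucc (rQ m)
def rP (n : Nat) : Nat := if n % 2 = 1 then (n >>> 1) ^^^ 140 else n >>> 1
def rQ (m : Nat) : Nat := if m % 2 = 1 then m >>> 1 else (m >>> 1) ^^^ 140

lemma parity_xor (a b : Nat) (ha : a % 2 = 0) : (a ^^^ b) % 2 = b % 2 := by
  rw [← Nat.and_one_is_mod, ← Nat.and_one_is_mod, Nat.and_xor_distrib_right,
    Nat.and_one_is_mod, Nat.and_one_is_mod, ha]
  simp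

lemma rP_xor (a b : Nat) (ha : a % 2 = 0) : rP (a ^^^ b) = (a >>> 1) ^^^ rP b := by
  unfold rP
  rw [parity_xor a b ha]
  split_ifs with h
  · rw [Nat.shiftRight_xor_distrib, Nat.xor_assoc]
  · rw [Nat.shiftRight_xor_distrib]

lemma rQ_xor (a b : Nat) (ha : a % 2 = 0) : rQ (a ^^^ b) = (a >>> 1) ^^^ rQ b := by
  unfold rQ
  rw [parity_xor a b ha]
  split_ifs with h
  · rw [Nat.shiftRight_xor_distrib]
  · rw [Nat.shiftRight_xor_distrib, Nat.xor_assoc]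

-- pushing a left-shifted "high part" through j rounds of any step with the xor property
lemma iterate_shift (f : Nat → Nat) (hf : ∀ a b, a % 2 = 0 → f (a ^^^ b) = (a >>> 1) ^^^ f b) :
    ∀ (j h b : Nat), f^[j] ((h <<< j) ^^^ b) = h ^^^ f^[j] b := by
  intro j
  induction j with
  | zero => intro h b; simp [Nat.shiftLeft_eq]
  | succ j ih =>
    intro h b
    have heven : (h <<< (j + 1)) % 2 = 0 := by
      rw [Nat.shiftLeft_eq, pow_succ, ← mul_assoc]
      omega
    have hsh : (h <<< (j + 1)) >>> 1 = h <<< j := by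
      rw [Nat.shiftLeft_eq, Nat.shiftLeft_eq, Nat.shiftRight_one, pow_succ, ← mul_assoc]
      exact Nat.mul_div_cancel _ (by norm_num)
    rw [Function.iterate_succ_apply, Function.iterate_succ_apply, hf _ _ heven, hsh]
    exact ih h (f b)

lemma decomp (n : Nat) : ((n >>> 8) <<< 8) ^^^ (n &&& 255) = n := by
  apply Nat.eq_of_testBit_eq
  intro i
  by_cases hi : i < 8
  · have h255 : Nat.testBit 255 i = true := by interval_cases i <;> rfl
    have hsl : ((n >>> 8) <<< 8).testBit i = false := by
      rw [Nat.testBit_shiftLeft]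
      simp [show ¬ (i ≥ 8) by omega]
    rw [Nat.testBit_xor, Nat.testBit_and, h255, hsl]
    simp
  · have h255 : (255 : Nat).testBit i = false :=
      Nat.testBit_lt_two_pow (by calc (255:Nat) < 2 ^ 8 := by norm_num
                                   _ ≤ 2 ^ i := Nat.pow_le_pow_right (by norm_num) (by omega))
    have hige : i ≥ 8 := by omega
    rw [Nat.testBit_xor, Nat.testBit_and, h255, Nat.testBit_shiftLeft, Nat.testBit_shiftRight]
    simp [hige, Nat.add_sub_cancel' hige]

lemma rP_hi (n : Nat) : rP^[8] n = (n >>> 8) ^^^ rP^[8] (n &&& 255) := by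
  have := iterate_shift rP rP_xor 8 (n >>> 8) (n &&& 255)
  rw [decomp] at this
  exact this

lemma rQ_hi (m : Nat) : rQ^[8] m = (m >>> 8) ^^^ rQ^[8] (m &&& 255) := by
  have := iterate_shift rQ rQ_xor 8 (m >>> 8) (m &&& 255)
  rw [decomp] at this
  exact this

-- on a byte, 8 negative-side rounds = 8 positive-side rounds on the complemented byte
set_option maxRecDepth 40000 in
lemma rQ_eq_rP_compl : ∀ l < 256, rQ^[8] l = rP^[8] (255 ^^^ l) := by decide

set_option maxRecDepth 40000 in
lemma sub_eq_xor_255 : ∀ l < 256, 255 - l = 255 ^^^ l := by decide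

-- unfolding the sign cases of the PySem primitives
lemma band_negSucc_nat (m b : Nat) :
    PySem.Int.band (Int.negSucc m) ((b : Nat) : Int) = ((b - (b &&& m) : Nat) : Int) := by
  simp only [PySem.Int.band]
  rw [if_neg (by omega : ¬ (0:Int) ≤ Int.negSucc m),
      if_pos (Int.natCast_nonneg b)]
  simp [Int.negSucc_eq]

lemma bxor_negSucc_nat (a b : Nat) :
    PySem.Int.bxor (Int.negSucc a) ((b : Nat) : Int) = Int.negSucc (a ^^^ b) := by
  simp only [PySem.Int.bxor]
  rw [if_neg (by omega : ¬ (0:Int) ≤ Int.negSucc a),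
      if_pos (Int.natCast_nonneg b)]
  simp [Int.negSucc_eq]
  omega

-- Int round ↦ Nat shadows
lemma crcRound_ofNat (n : Nat) : crc9xRound ((n : Nat) : Int) = ((rP n : Nat) : Int) := by
  unfold crc9xRound rP
  have hb : PySem.Int.band ((n : Nat) : Int) 1 = ((n &&& 1 : Nat) : Int) := by
    have := PySem.Int.band_natCast n 1
    simpa using this
  rw [hb, Nat.and_one_is_mod]
  have hs : ((n : Nat) : Int) >>> (1:Nat) = ((n >>> 1 : Nat) : Int) := rfl
  rcases Nat.mod_two_eq_zero_or_one n with h | h <;> rw [h]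
  · rw [if_neg (by norm_num : ¬ (((0:Nat) : Int) ≠ 0)), if_neg (by norm_num : ¬ (0 = 1)), hs]
  · rw [if_pos rfl, if_pos (by norm_num), hs]
    have := PySem.Int.bxor_natCast (n >>> 1) 140
    simpa using this

lemma crcRound_negSucc (m : Nat) : crc9xRound (Int.negSucc m) = Int.negSucc (rQ m) := by
  unfold crc9xRound rQ
  have hb : PySem.Int.band (Int.negSucc m) 1 = ((1 - (1 &&& m) : Nat) : Int) := by
    have := band_negSucc_nat m 1
    simpa using this
  have h1m : 1 &&& m = m % 2 := by rw [Nat.and_comm, Nat.and_one_is_mod]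
  rw [hb, h1m]
  have hs : Int.negSucc m >>> (1:Nat) = Int.negSucc (m >>> 1) := rfl
  rcases Nat.mod_two_eq_zero_or_one m with h | h <;> rw [h]
  · rw [if_pos (by simp), if_neg (by omega), hs]
    have := bxor_negSucc_nat (m >>> 1) 140
    simpa using this
  · rw [if_neg (by simp), if_pos rfl, hs]

-- iterating to 8 rounds on each half
lemma iter_ofNat : ∀ (j : Nat) (n : Nat), crc9xRound^[j] ((n : Nat) : Int) = ((rP^[j] n : Nat) : Int) := by
  intro j
  induction j with
  | zero => intro n; rfl
  | succ j ih =>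
    intro n
    rw [Function.iterate_succ_apply, Function.iterate_succ_apply, crcRound_ofNat]
    exact ih (rP n)

lemma iter_negSucc : ∀ (j : Nat) (m : Nat), crc9xRound^[j] (Int.negSucc m) = Int.negSucc (rQ^[j] m) := by
  intro j
  induction j with
  | zero => intro m; rfl
  | succ j ih =>
    intro m
    rw [Function.iterate_succ_apply, Function.iterate_succ_apply, crcRound_negSucc]
    exact ih (rQ m)

-- the two loop bodies compute the same 8-round iteration
lemma foldl_range8 (x : Int) :
    (PySem.List.pyRange 0 8 1).foldl (fun c _ => crc9xRound c) x = crc9xRound^[8] x := by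
  rw [show PySem.List.pyRange 0 8 1 = [0,1,2,3,4,5,6,7] by decide]
  rfl

lemma tableEntry_eq (b : Int) : crcTableEntry b = crc9xRound^[8] b := by
  unfold crcTableEntry
  rw [show PySem.List.pyRange 0 8 1 = [0,1,2,3,4,5,6,7] by decide]
  rfl

set_option maxRecDepth 40000 in
lemma pyRange256 : PySem.List.pyRange 0 256 1 = (List.range 256).map Int.ofNat := by
  decide

-- table lookup at an in-range index
set_option maxRecDepth 40000 in
lemma table_lookup (l : Nat) (hl : l < 256) :
    PySem.List.pyGet? crcTable ((l : Nat) : Int) = some (crcTableEntry ((l : Nat) : Int)) := by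
  unfold crcTable
  rw [PySem.List.pyGet?_natCast, pyRange256, List.getElem?_map, List.getElem?_map,
      List.getElem?_range hl]
  rfl

-- the heart: 8 bit-loop rounds = shift of the high part + one table lookup, for EVERY Int
lemma step_eq (x : Int) :
    crc9xRound^[8] x =
      PySem.Int.bxor (x >>> (8:Nat)) ((PySem.List.pyGet? crcTable (PySem.Int.band x 255)).getD 0) := by
  cases x with
  | ofNat n =>
    simp only [Int.ofNat_eq_natCast]
    have hband : PySem.Int.band ((n : Nat) : Int) 255 = ((n &&& 255 : Nat) : Int) := by
      have := PySem.Int.band_natCast n 255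
      simpa using this
    have hlt : n &&& 255 < 256 := by have := Nat.and_le_right (n := n) (m := 255); omega
    rw [hband, iter_ofNat, table_lookup _ hlt, rP_hi n]
    have hs : ((n : Nat) : Int) >>> (8:Nat) = ((n >>> 8 : Nat) : Int) := rfl
    rw [hs, Option.getD_some, tableEntry_eq, iter_ofNat]
    have := PySem.Int.bxor_natCast (n >>> 8) (rP^[8] (n &&& 255))
    simpa using this
  | negSucc m =>
    have hband : PySem.Int.band (Int.negSucc m) 255 = ((255 - (255 &&& m) : Nat) : Int) := by
      have := band_negSucc_nat m 255
      simpa using this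
    have hlow : 255 &&& m = m &&& 255 := Nat.and_comm 255 m
    have hle : m &&& 255 < 256 := by have := Nat.and_le_right (n := m) (m := 255); omega
    have hidx : 255 - (255 &&& m) = 255 ^^^ (m &&& 255) := by
      rw [hlow]; exact sub_eq_xor_255 (m &&& 255) hle
    have hidxlt : 255 - (255 &&& m) < 256 := by omega
    rw [hband, iter_negSucc, table_lookup _ hidxlt, Option.getD_some, tableEntry_eq, iter_ofNat,
        hidx, ← rQ_eq_rP_compl (m &&& 255) hle, rQ_hi m]
    have hs : Int.negSucc m >>> (8:Nat) = Int.negSucc (m >>> 8) := rfl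
    rw [hs]
    exact (bxor_negSucc_nat (m >>> 8) (rQ^[8] (m &&& 255))).symm

-- ===== VERDICT (by name: the statement is the Claim_ definition above) =====
theorem encode9x_spec : Claim_equal_encode9x := by
  intro values _
  unfold Spec_encode9x encode9x encode9x_alt crc_9x
  have hfun :
      (fun (crc value : Int) =>
        (PySem.List.pyRange 0 8 1).foldl (fun c _ => crc9xRound c) (PySem.Int.bxor crc value)) =
      (fun (crc value : Int) =>
        let x := PySem.Int.bxor crc value
        PySem.Int.bxor (x >>> (8:Nat)) ((PySem.List.pyGet? crcTable (PySem.Int.band x 255)).getD 0)) := by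
    funext crc value
    rw [foldl_range8, step_eq]
  rw [hfun]
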